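-- pv_equiv track=rewrite | github.com/schmitfe/EI-Clustering | BinaryNetwork/ClusteredEI_network.py | _split_counts
-- ===== SOURCE A (Python) =====
-- from typing import Callable, Dict, List, Sequence, Tuple
--
-- def _split_counts(total: int, groups: int) -> List[int]:
--     if groups <= 0:
--         raise ValueError("Q must be positive.")
--     base = total // groups
--     remainder = total % groups
--     counts = []
--     for idx in range(groups):
--         counts.append(base + (1 if idx < remainder else 0))
--     return counts
-- ===== SOURCE B (Python) =====
-- def _split_counts(total: int, groups: int):
--     if groups <= 0:
--         raise ValueError("Q must be positive.")
--     counts = []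
--     remaining = total
--     for g in range(groups, 0, -1):
--         q = -(-remaining // g)  # ceiling share of what is still to distribute
--         counts.append(q)
--         remaining -= q
--     return counts
-- ===== Notes on version B (the rewrite author's own statement) =====
-- stated objective: alternative
-- what changed: Replaces the precomputed divmod base/remainder with an exact greedy apportionment: each step takes the ceiling share of the still-undistributed total over the remaining group count, maintaining a running remainder instead of an index comparison.
import Mathlib
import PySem

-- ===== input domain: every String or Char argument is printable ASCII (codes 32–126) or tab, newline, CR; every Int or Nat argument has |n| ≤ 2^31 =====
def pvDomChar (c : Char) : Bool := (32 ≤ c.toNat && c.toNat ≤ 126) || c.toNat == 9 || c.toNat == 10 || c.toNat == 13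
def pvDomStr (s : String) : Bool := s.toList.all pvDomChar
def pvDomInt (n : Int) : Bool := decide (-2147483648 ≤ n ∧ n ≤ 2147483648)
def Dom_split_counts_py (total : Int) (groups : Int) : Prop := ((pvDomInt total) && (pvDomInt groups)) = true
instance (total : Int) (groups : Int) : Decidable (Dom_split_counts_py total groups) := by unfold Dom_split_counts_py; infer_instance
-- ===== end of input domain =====

-- B replaces A's divmod base/remainder with an exact greedy apportionment: each step
-- hands out the ceiling share of the still-undistributed total over the remaining
-- group count (objective: alternative algorithm, same cost).

-- ===== PORT A =====
def split_counts_py (total : Int) (groups : Int) : List Int :=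
  let base := PySem.Int.floordiv total groups
  let remainder := PySem.Int.mod total groups
  (PySem.List.pyRange 0 groups 1).foldl
    (fun counts idx => counts ++ [base + (if idx < remainder then 1 else 0)]) []

-- ===== PORT B =====
def split_counts_py_alt (total : Int) (groups : Int) : List Int :=
  if groups ≤ 0 then []   -- Python raises ValueError here (excluded by Pre_)
  else
    ((PySem.List.pyRange groups 0 (-1)).foldl
      (fun (st : List Int × Int) g =>
        let q := -(PySem.Int.floordiv (-st.2) g)
        (st.1 ++ [q], st.2 - q)) ([], total)).1

-- ===== PRECONDITION & SPEC =====
-- Python A raises ValueError when groups <= 0; exactly those inputs are excluded.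
def Pre_split_counts_py (_total : Int) (groups : Int) : Prop := 0 < groups
instance (total : Int) (groups : Int) : Decidable (Pre_split_counts_py total groups) := by unfold Pre_split_counts_py; infer_instance
def pvWitness_split_counts_py : Int × Int := (7, 3)

def Spec_split_counts_py (total : Int) (groups : Int) (out : List Int) : Prop := out = split_counts_py_alt total groups
instance (total : Int) (groups : Int) (out : List Int) : Decidable (Spec_split_counts_py total groups out) := by unfold Spec_split_counts_py; infer_instance

-- ===== CLAIM (what is proved, stated in full; the proofs are below) =====
def Claim_equal_split_counts_py : Prop := ∀ (total : Int) (groups : Int), Dom_split_counts_py total groups → Pre_split_counts_py total groups → Spec_split_counts_py total groups (split_counts_py total groups)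

-- ===== LEMMAS AND PROOFS =====

-- The canonical front-loaded split: r copies of b+1 followed by g-r copies of b.
def pvBlocks (total g : Int) : List Int :=
  List.replicate (PySem.Int.mod total g).toNat (PySem.Int.floordiv total g + 1) ++
    List.replicate (g - PySem.Int.mod total g).toNat (PySem.Int.floordiv total g)

-- A's loop produces the canonical blocks.
lemma a_eq_blocks (total g : Int) (hg : 0 < g) :
    split_counts_py total g = pvBlocks total g := by
  have h0 : (0:Int) ≤ PySem.Int.mod total g := PySem.Int.mod_nonneg total hg
  have hlt : PySem.Int.mod total g < g := PySem.Int.mod_lt total hg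
  unfold split_counts_py pvBlocks
  simp only [PySem.List.foldl_append_singleton_eq_map, List.nil_append]
  rw [PySem.List.pyRange_one_append 0 (PySem.Int.mod total g) g h0 (le_of_lt hlt),
    List.map_append]
  congr 1
  · rw [List.eq_replicate_iff]
    refine ⟨by simp [PySem.List.length_pyRange_one], ?_⟩
    intro x hx
    simp only [List.mem_map] at hx
    obtain ⟨i, hi, rfl⟩ := hx
    rw [PySem.List.mem_pyRange_one] at hi
    simp [hi.2]
  · rw [List.eq_replicate_iff]
    refine ⟨by simp [PySem.List.length_pyRange_one], ?_⟩
    intro x hx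
    simp only [List.mem_map] at hx
    obtain ⟨i, hi, rfl⟩ := hx
    rw [PySem.List.mem_pyRange_one] at hi
    simp [not_lt.mpr hi.1]

-- B's greedy loop produces the canonical blocks, for any accumulator/remaining state.
lemma greedy_blocks (n : Nat) : ∀ (g rem : Int) (acc : List Int), g.toNat = n + 1 →
    ((PySem.List.pyRange g 0 (-1)).foldl
      (fun (st : List Int × Int) k =>
        let q := -(PySem.Int.floordiv (-st.2) k)
        (st.1 ++ [q], st.2 - q)) (acc, rem)).1 = acc ++ pvBlocks rem g := by
  induction n with
  | zero =>
    intro g rem acc hg1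
    have hg : g = 1 := by omega
    subst hg
    rw [PySem.List.pyRange_neg_one_cons (by norm_num : (0:Int) < 1)]
    simp only [List.foldl_cons]
    rw [show (1:Int) - 1 = 0 by ring, PySem.List.pyRange_neg_one_eq_nil (le_refl 0)]
    have hq : -(PySem.Int.floordiv (-rem) 1) = rem := by
      rw [PySem.Int.neg_floordiv_neg_eq_iff_of_pos (by norm_num : (0:Int) < 1)]
      constructor <;> nlinarith
    have hb : PySem.Int.floordiv rem 1 = rem := by
      rw [PySem.Int.floordiv_eq_iff_of_pos (by norm_num : (0:Int) < 1)]
      constructor <;> nlinarith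
    have hr : PySem.Int.mod rem 1 = 0 := by
      have := PySem.Int.floordiv_mul_add_mod rem 1
      rw [hb] at this; omega
    simp [pvBlocks]
  | succ n ih =>
    intro g rem acc hg1
    have hgpos : (0:Int) < g := by omega
    have hg1pos : (0:Int) < g - 1 := by omega
    set b := PySem.Int.floordiv rem g with hbdef
    set r := PySem.Int.mod rem g with hrdef
    have h0 : (0:Int) ≤ r := PySem.Int.mod_nonneg rem hgpos
    have hlt : r < g := PySem.Int.mod_lt rem hgpos
    have hsum : b * g + r = rem := PySem.Int.floordiv_mul_add_mod rem g
    rw [PySem.List.pyRange_neg_one_cons hgpos]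
    simp only [List.foldl_cons]
    by_cases hr0 : r = 0
    · -- exact division: the greedy share is b, and what remains is b*(g-1)
      have hq : -(PySem.Int.floordiv (-rem) g) = b := by
        rw [PySem.Int.neg_floordiv_neg_eq_iff_of_pos hgpos]
        constructor <;> nlinarith
      have hb' : PySem.Int.floordiv (rem - b) (g - 1) = b := by
        rw [PySem.Int.floordiv_eq_iff_of_pos hg1pos]
        constructor <;> nlinarith
      have hr' : PySem.Int.mod (rem - b) (g - 1) = 0 := by
        have := PySem.Int.floordiv_mul_add_mod (rem - b) (g - 1)
        rw [hb'] at this; nlinarith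
      rw [hq, ih (g - 1) (rem - b) (acc ++ [b]) (by omega)]
      simp only [pvBlocks, hb', hr', ← hbdef, ← hrdef, hr0]
      have hgt : g.toNat = (g - 1).toNat + 1 := by omega
      rw [show g - 1 - 0 = g - 1 by ring, show g - 0 = g by ring, hgt]
      simp [List.replicate_succ, List.append_assoc]
    · -- r > 0: the greedy share is b+1, leaving b*(g-1) + (r-1)
      have hrpos : (0:Int) < r := lt_of_le_of_ne h0 (Ne.symm hr0)
      have hq : -(PySem.Int.floordiv (-rem) g) = b + 1 := by
        rw [PySem.Int.neg_floordiv_neg_eq_iff_of_pos hgpos]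
        constructor <;> nlinarith
      have hb' : PySem.Int.floordiv (rem - (b + 1)) (g - 1) = b := by
        rw [PySem.Int.floordiv_eq_iff_of_pos hg1pos]
        constructor <;> nlinarith
      have hr' : PySem.Int.mod (rem - (b + 1)) (g - 1) = r - 1 := by
        have := PySem.Int.floordiv_mul_add_mod (rem - (b + 1)) (g - 1)
        rw [hb'] at this; nlinarith
      rw [hq, ih (g - 1) (rem - (b + 1)) (acc ++ [b + 1]) (by omega)]
      simp only [pvBlocks, hb', hr', ← hbdef, ← hrdef]
      have hrt : r.toNat = (r - 1).toNat + 1 := by omega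
      have hgt : g - 1 - (r - 1) = g - r := by ring
      rw [hgt, hrt]
      simp [List.replicate_succ, List.append_assoc]

-- ===== VERDICT (by name: the statement is the Claim_ definition above) =====
theorem split_counts_py_spec : Claim_equal_split_counts_py := by
  intro total groups _ hpre
  have hg : (0:Int) < groups := hpre
  unfold Spec_split_counts_py split_counts_py_alt
  rw [if_neg (by omega), greedy_blocks (groups.toNat - 1) groups total [] (by omega),
    List.nil_append]
  exact a_eq_blocks total groups hg
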